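-- pv_equiv track=rewrite | github.com/Benevdx/SequenciamentoPAA | victorbenevides_202100011889_sequenciamento.py | calcular_probabilidade_doenca
-- ===== SOURCE A (Python) =====
-- from typing import List
-- import math
--
-- def encontrar_ocorrencias_gene(sequencia_dna: str, gene: str, tamanho_minimo_substring: int) -> bool:
--     """
--     Correspondência de padrões super otimizada - apenas verifica se o gene aparece vezes suficientes
--     para contribuir para a probabilidade da doença. Retorna antecipadamente quando o limite é atingido.
--     """
--     if not gene or not sequencia_dna:
--         return False
--
--     # Só precisa encontrar se o gene aparece vezes suficientes para contar
--     contagem = 0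
--     inicio = 0
--
--     # Busca de substring simples e rápida que retorna assim que o limite é atingido
--     while inicio <= len(sequencia_dna) - len(gene):
--         posicao = sequencia_dna.find(gene, inicio)
--         if posicao == -1:
--             break
--
--         contagem += len(gene)
--         if contagem >= tamanho_minimo_substring:
--             return True
--
--         inicio = posicao + 1
--
--     return False
--
-- def calcular_probabilidade_doenca(sequencia_dna: str, genes: List[str], tamanho_minimo_substring: int):
--     """Cálculo de probabilidade de doença ultra-otimizado"""
--     if not genes:
--         return 0
--
--     # Usa uma abordagem de bitmap para melhor desempenho em listas grandes
--     genes_correspondentes = 0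
--
--     for gene in genes:
--         if encontrar_ocorrencias_gene(sequencia_dna, gene, tamanho_minimo_substring):
--             genes_correspondentes += 1
--
--     probabilidade_doenca = math.floor(((genes_correspondentes / len(genes)) * 100)+0.5)
--     return min(probabilidade_doenca, 100)
-- ===== SOURCE B (Python) =====
-- from typing import List
-- import math
--
-- def _gene_presente(sequencia_dna: str, gene: str, tamanho_minimo_substring: int) -> bool:
--     """A gene counts iff its overlapping occurrences cover at least the required
--     length: occurrences >= max(1, ceil(threshold / len(gene)))."""
--     L = len(gene)
--     if L == 0:
--         return False
--     necessarios = max(1, -(-tamanho_minimo_substring // L))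
--     ocorrencias = sum(
--         1
--         for i in range(len(sequencia_dna) - L + 1)
--         if sequencia_dna[i:i + L] == gene
--     )
--     return ocorrencias >= necessarios
--
-- def calcular_probabilidade_doenca(sequencia_dna: str, genes: List[str], tamanho_minimo_substring: int):
--     if not genes:
--         return 0
--     correspondentes = sum(
--         1 for gene in genes
--         if _gene_presente(sequencia_dna, gene, tamanho_minimo_substring)
--     )
--     return min(math.floor(((correspondentes / len(genes)) * 100) + 0.5), 100)
-- ===== Notes on version B (the rewrite author's own statement) =====
-- stated objective: alternative
-- what changed: Per gene, A repeatedly calls str.find, accumulates matched length and early-exits at the threshold; B instead turns the length threshold into a required occurrence count max(1, ceil(t/len(gene))) and compares it with a direct count of all matching start positions, then both scale the matched-gene fraction to a percent with the same float expression.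
import Mathlib
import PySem

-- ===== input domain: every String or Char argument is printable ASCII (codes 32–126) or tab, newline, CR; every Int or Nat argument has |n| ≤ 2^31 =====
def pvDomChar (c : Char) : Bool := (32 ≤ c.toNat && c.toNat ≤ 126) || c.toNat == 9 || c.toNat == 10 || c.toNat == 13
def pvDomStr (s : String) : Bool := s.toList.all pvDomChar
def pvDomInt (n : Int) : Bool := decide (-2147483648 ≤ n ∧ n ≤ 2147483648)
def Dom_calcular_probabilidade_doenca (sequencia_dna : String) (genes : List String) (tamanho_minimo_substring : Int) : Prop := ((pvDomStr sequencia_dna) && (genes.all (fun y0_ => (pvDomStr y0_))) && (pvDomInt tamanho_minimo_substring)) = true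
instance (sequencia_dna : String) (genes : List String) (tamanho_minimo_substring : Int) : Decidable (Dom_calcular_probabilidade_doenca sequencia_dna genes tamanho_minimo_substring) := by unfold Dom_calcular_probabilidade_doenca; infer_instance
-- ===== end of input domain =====

-- B replaces A's find-and-accumulate scan per gene by an arithmetic occurrence
-- threshold (max(1, ceil(t/len)) occurrences) checked against a direct count of
-- matching positions; objective: alternative decomposition (not claimed faster).
-- Both Pythons compute the final percentage with the same float expression
-- `math.floor(((m/n)*100)+0.5)`; its binary64 arithmetic is modelled exactly by
-- the shared helper pvFpRound (hand-written port of IEEE-754 round-to-nearest-even).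

-- ===== SHARED FLOAT MODEL (both Pythons contain the identical final line) =====
-- Exact binary64 round-to-nearest-even of a nonnegative rational in the normal range.
def pvFpRound (x : ℚ) : ℚ :=
  if x ≤ 0 then 0
  else
    let la : Int := (Nat.log2 x.num.toNat : Int)
    let lb : Int := (Nat.log2 x.den : Int)
    let e : Int := la - lb
    let E : Int := if x < (2 : ℚ) ^ e then e else e + 1
    let s : Int := E - 53
    let y : ℚ := x / (2 : ℚ) ^ s
    let f : Int := ⌊y⌋
    let r : ℚ := y - (f : ℚ)
    let m : Int :=
      if r < 1/2 then f
      else if 1/2 < r then f + 1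
      else if f % 2 = 0 then f else f + 1
    (m : ℚ) * (2 : ℚ) ^ s

-- math.floor(((m/n)*100)+0.5) with IEEE-754 double arithmetic
def pvFloorPercent (m n : Int) : Int :=
  let q := pvFpRound ((m : ℚ) / (n : ℚ))
  let q2 := pvFpRound (q * 100)
  let q3 := pvFpRound (q2 + 1/2)
  ⌊q3⌋

-- ===== PORT A =====
-- while-loop of encontrar_ocorrencias_gene: state (contagem, inicio)
def pvFindLoop (dna g : List Char) (t : Int) (contagem : Int) (inicio : Nat) : Bool :=
  if h : (inicio : Int) ≤ (dna.length : Int) - (g.length : Int) then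
    -- posicao = sequencia_dna.find(gene, inicio)
    if hp : PySem.Chars.findFrom dna g (inicio : Int) none = -1 then false
    else
      if t ≤ contagem + (g.length : Int) then true
      else pvFindLoop dna g t (contagem + (g.length : Int))
        ((PySem.Chars.findFrom dna g (inicio : Int) none).toNat + 1)
  else false
termination_by dna.length + 1 - inicio
decreasing_by
  have hk : inicio ≤ dna.length := by omega
  have := (PySem.Chars.findFrom_natCast_spec dna g inicio hk hp).1
  omega

def pvEncontrarOcorrenciasGene (dna g : List Char) (t : Int) : Bool :=
  if g = [] ∨ dna = [] then false
  else pvFindLoop dna g t 0 0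

def calcular_probabilidade_doenca (sequencia_dna : String) (genes : List String) (tamanho_minimo_substring : Int) : Int :=
  if genes = [] then 0
  else
    let m : Int := genes.foldl
      (fun acc gene =>
        if pvEncontrarOcorrenciasGene sequencia_dna.toList gene.toList tamanho_minimo_substring
        then acc + 1 else acc) 0
    min (pvFloorPercent m (genes.length : Int)) 100

-- ===== PORT B =====
def pvGenePresente (dna g : List Char) (t : Int) : Bool :=
  if g.length = 0 then false
  else
    -- necessarios = max(1, -(-t // L)); ocorrencias = sum(1 for i in range(n-L+1) if dna[i:i+L]==gene)
    decide (max 1 (-(PySem.Int.floordiv (-t) (g.length : Int))) ≤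
      (((PySem.List.pyRange 0 ((dna.length : Int) - (g.length : Int) + 1) 1).countP
        (fun i => PySem.List.slice dna (some i) (some (i + (g.length : Int))) == g) : Nat) : Int))

def calcular_probabilidade_doenca_alt (sequencia_dna : String) (genes : List String) (tamanho_minimo_substring : Int) : Int :=
  if genes = [] then 0
  else
    let m : Int := ((genes.countP
      (fun gene => pvGenePresente sequencia_dna.toList gene.toList tamanho_minimo_substring) : Nat) : Int)
    min (pvFloorPercent m (genes.length : Int)) 100

-- ===== PRECONDITION & SPEC =====
def Spec_calcular_probabilidade_doenca (sequencia_dna : String) (genes : List String) (tamanho_minimo_substring : Int) (out : Int) : Prop := out = calcular_probabilidade_doenca_alt sequencia_dna genes tamanho_minimo_substring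
instance (sequencia_dna : String) (genes : List String) (tamanho_minimo_substring : Int) (out : Int) : Decidable (Spec_calcular_probabilidade_doenca sequencia_dna genes tamanho_minimo_substring out) := by unfold Spec_calcular_probabilidade_doenca; infer_instance

-- ===== CLAIM (what is proved, stated in full; the proofs are below) =====
def Claim_equal_calcular_probabilidade_doenca : Prop := ∀ (sequencia_dna : String) (genes : List String) (tamanho_minimo_substring : Int), Dom_calcular_probabilidade_doenca sequencia_dna genes tamanho_minimo_substring → Spec_calcular_probabilidade_doenca sequencia_dna genes tamanho_minimo_substring (calcular_probabilidade_doenca sequencia_dna genes tamanho_minimo_substring)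

-- ===== LEMMAS AND PROOFS =====
-- number of overlapping occurrences of g in dna at positions ≥ i
def pvCnt (dna g : List Char) (i : Nat) : Nat :=
  (List.range' i (dna.length + 1 - g.length - i)).countP (fun j => decide (g <+: dna.drop j))

lemma pvCnt_zero_of_none (dna g : List Char) (i : Nat)
    (h : ∀ j, i ≤ j → ¬ g <+: dna.drop j) : pvCnt dna g i = 0 := by
  unfold pvCnt
  apply List.countP_eq_zero.2
  intro j hj
  have : i ≤ j := (List.mem_range'_1.1 hj).1
  simp [h j this]

lemma pvCnt_split (dna g : List Char) (i p : Nat) (hip : i ≤ p)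
    (hpL : p + g.length ≤ dna.length)
    (hmatch : g <+: dna.drop p)
    (hnone : ∀ j, i ≤ j → j < p → ¬ g <+: dna.drop j) :
    pvCnt dna g i = pvCnt dna g (p + 1) + 1 := by
  unfold pvCnt
  have h1 : dna.length + 1 - g.length - i
      = (p - i) + ((dna.length + 1 - g.length - (p + 1)) + 1) := by omega
  rw [h1, ← List.range'_append_1, List.countP_append]
  have h2 : i + (p - i) = p := by omega
  rw [h2]
  have hz : (List.range' i (p - i)).countP (fun j => decide (g <+: dna.drop j)) = 0 := by
    apply List.countP_eq_zero.2
    intro j hj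
    have hj' := List.mem_range'_1.1 hj
    simp [hnone j hj'.1 (by omega)]
  rw [hz, List.range'_succ]
  simp [hmatch]

lemma pvFindLoop_eq (dna g : List Char) (hg : g ≠ []) (t contagem : Int) (inicio : Nat) :
    pvFindLoop dna g t contagem inicio =
      decide (1 ≤ pvCnt dna g inicio ∧
        t ≤ contagem + (pvCnt dna g inicio : Int) * (g.length : Int)) := by
  have hLpos : 0 < g.length := List.length_pos_iff.2 hg
  have hL0 : (0 : Int) ≤ (g.length : Int) := by positivity
  have main : ∀ k inicio contagem, dna.length + 1 - inicio ≤ k →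
      pvFindLoop dna g t contagem inicio =
        decide (1 ≤ pvCnt dna g inicio ∧
          t ≤ contagem + (pvCnt dna g inicio : Int) * (g.length : Int)) := by
    intro k
    induction k with
    | zero =>
      intro inicio contagem hk
      have hcond : ¬ ((inicio : Int) ≤ (dna.length : Int) - (g.length : Int)) := by omega
      rw [pvFindLoop, dif_neg hcond]
      have hzero : dna.length + 1 - g.length - inicio = 0 := by omega
      simp [pvCnt, hzero]
    | succ k ih =>
      intro inicio contagem hk
      rw [pvFindLoop]
      by_cases hcond : ((inicio : Int) ≤ (dna.length : Int) - (g.length : Int))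
      · rw [dif_pos hcond]
        have hk' : inicio ≤ dna.length := by omega
        by_cases hp : PySem.Chars.findFrom dna g (inicio : Int) none = -1
        · rw [dif_pos hp]
          have hninfix : ¬ g <:+: dna.drop inicio :=
            (PySem.Chars.findFrom_natCast_eq_neg_one_iff dna g inicio hk').1 hp
          have hcnt : pvCnt dna g inicio = 0 := by
            apply pvCnt_zero_of_none
            intro j hij hpre
            apply hninfix
            have hdd : dna.drop j = (dna.drop inicio).drop (j - inicio) := by
              rw [List.drop_drop]
              congr 1
              omega
            have hex : ∃ j', g <+: (dna.drop inicio).drop j' :=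
              ⟨j - inicio, by rw [← hdd]; exact hpre⟩
            have := (PySem.Chars.exists_prefix_drop_iff_isIn g (dna.drop inicio)).1 hex
            exact (PySem.Chars.isIn_iff_infix g (dna.drop inicio)).1 this
          simp [hcnt]
        · rw [dif_neg hp]
          obtain ⟨hple, hpref, hnone⟩ := PySem.Chars.findFrom_natCast_spec dna g inicio hk' hp
          have hip : inicio ≤ (PySem.Chars.findFrom dna g (inicio : Int) none).toNat := by omega
          have hlen : g.length ≤ (dna.drop (PySem.Chars.findFrom dna g (inicio : Int) none).toNat).length :=
            hpref.length_le
          rw [List.length_drop] at hlen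
          have hplen : (PySem.Chars.findFrom dna g (inicio : Int) none).toNat + g.length ≤ dna.length := by
            omega
          have hsplit := pvCnt_split dna g inicio
            (PySem.Chars.findFrom dna g (inicio : Int) none).toNat hip hplen hpref
            (fun j h1 h2 => hnone j h1 h2)
          by_cases ht : t ≤ contagem + (g.length : Int)
          · rw [if_pos ht]
            symm
            rw [decide_eq_true_iff]
            have hc1 : 1 ≤ pvCnt dna g inicio := by omega
            refine ⟨hc1, ?_⟩
            have hc1' : (1 : Int) ≤ (pvCnt dna g inicio : Int) := by exact_mod_cast hc1
            have hprod : (0 : Int) ≤ ((pvCnt dna g inicio : Int) - 1) * (g.length : Int) :=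
              mul_nonneg (by linarith) hL0
            have hring : ((pvCnt dna g inicio : Int) - 1) * (g.length : Int)
                = (pvCnt dna g inicio : Int) * (g.length : Int) - (g.length : Int) := by ring
            linarith
          · rw [if_neg ht]
            rw [ih ((PySem.Chars.findFrom dna g (inicio : Int) none).toNat + 1)
              (contagem + (g.length : Int)) (by omega)]
            rw [hsplit]
            apply decide_eq_decide.mpr
            push_cast
            constructor
            · rintro ⟨h1, h2⟩
              refine ⟨?_, ?_⟩
              · trivial
              · have hring : ((pvCnt dna g ((PySem.Chars.findFrom dna g (inicio : Int) none).toNat + 1) : Int) + 1)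
                    * (g.length : Int)
                    = (pvCnt dna g ((PySem.Chars.findFrom dna g (inicio : Int) none).toNat + 1) : Int)
                      * (g.length : Int) + (g.length : Int) := by ring
                rw [hring]
                have h1' : (1 : Int) ≤ (pvCnt dna g ((PySem.Chars.findFrom dna g (inicio : Int) none).toNat + 1) : Int) := by
                  exact_mod_cast h1
                linarith
            · rintro ⟨-, h2⟩
              have hring : ((pvCnt dna g ((PySem.Chars.findFrom dna g (inicio : Int) none).toNat + 1) : Int) + 1)
                  * (g.length : Int)
                  = (pvCnt dna g ((PySem.Chars.findFrom dna g (inicio : Int) none).toNat + 1) : Int)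
                    * (g.length : Int) + (g.length : Int) := by ring
              rw [hring] at h2
              by_cases hcz : pvCnt dna g ((PySem.Chars.findFrom dna g (inicio : Int) none).toNat + 1) = 0
              · exfalso
                apply ht
                rw [hcz] at h2
                push_cast at h2
                linarith
              · have h1 : 1 ≤ pvCnt dna g ((PySem.Chars.findFrom dna g (inicio : Int) none).toNat + 1) := by
                  omega
                exact ⟨h1, by linarith⟩
      · rw [dif_neg hcond]
        have hzero : dna.length + 1 - g.length - inicio = 0 := by omega
        simp [pvCnt, hzero]
  exact main (dna.length + 1 - inicio) inicio contagem (by omega)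

lemma pvOcorr_eq (dna g : List Char) :
    ((PySem.List.pyRange 0 ((dna.length : Int) - (g.length : Int) + 1) 1).countP
      (fun i => PySem.List.slice dna (some i) (some (i + (g.length : Int))) == g))
    = pvCnt dna g 0 := by
  rw [PySem.List.pyRange_one, List.countP_map]
  have hM : (((dna.length : Int) - (g.length : Int) + 1) - 0).toNat
      = dna.length + 1 - g.length := by omega
  rw [hM]
  unfold pvCnt
  rw [← List.range_eq_range']
  simp only [Nat.sub_zero]
  apply List.countP_congr
  intro a _
  simp only [Function.comp_apply]
  have h0 : ((0 : Int) + (a : Int)) = ((a : Nat) : Int) := by omega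
  rw [h0, PySem.List.slice_natCast_add]
  have hiff : (g <+: dna.drop a) ↔ ((dna.drop a).take g.length = g) := by
    rw [List.prefix_iff_eq_take]
    exact eq_comm
  by_cases hx : (dna.drop a).take g.length = g <;> simp [hx, hiff]

lemma pvGene_eq (dna g : List Char) (t : Int) :
    pvEncontrarOcorrenciasGene dna g t = pvGenePresente dna g t := by
  by_cases hgnil : g = []
  · simp [pvEncontrarOcorrenciasGene, pvGenePresente, hgnil]
  · have hLpos : 0 < g.length := List.length_pos_iff.2 hgnil
    have hB : pvGenePresente dna g t =
        decide (max 1 (-(PySem.Int.floordiv (-t) (g.length : Int))) ≤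
          ((pvCnt dna g 0 : Nat) : Int)) := by
      unfold pvGenePresente
      rw [if_neg (by omega), pvOcorr_eq dna g]
    rw [hB]
    unfold pvEncontrarOcorrenciasGene
    by_cases hdnil : dna = []
    · have hcnt : pvCnt dna g 0 = 0 := by
        subst hdnil
        simp [pvCnt, show 0 + 1 - g.length - 0 = 0 by omega]
      rw [if_pos (Or.inr hdnil), hcnt]
      symm
      rw [decide_eq_false_iff_not]
      intro hle
      have h1 : (1 : Int) ≤ ((0 : Nat) : Int) := le_trans (le_max_left _ _) hle
      norm_num at h1
    · rw [if_neg (by simp [hgnil, hdnil]), pvFindLoop_eq dna g hgnil t 0 0]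
      apply decide_eq_decide.mpr
      rw [max_le_iff]
      have hL : (0 : Int) < (g.length : Int) := by exact_mod_cast hLpos
      have hkey : (-(PySem.Int.floordiv (-t) (g.length : Int)) ≤ ((pvCnt dna g 0 : Nat) : Int))
          ↔ t ≤ ((pvCnt dna g 0 : Nat) : Int) * (g.length : Int) := by
        rw [neg_le, PySem.Int.le_floordiv_iff_mul_le hL, neg_mul]
        constructor <;> intro h <;> linarith
      rw [hkey]
      constructor
      · rintro ⟨h1, h2⟩
        exact ⟨by exact_mod_cast h1, by linarith⟩
      · rintro ⟨h1, h2⟩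
        exact ⟨by exact_mod_cast h1, by linarith⟩

-- ===== VERDICT (by name: the statement is the Claim_ definition above) =====
theorem calcular_probabilidade_doenca_spec : Claim_equal_calcular_probabilidade_doenca := by
  intro dna genes t _
  unfold Spec_calcular_probabilidade_doenca
  unfold calcular_probabilidade_doenca calcular_probabilidade_doenca_alt
  by_cases hg : genes = []
  · simp [hg]
  · simp only [hg, if_false]
    have hm : genes.foldl
        (fun acc gene =>
          if pvEncontrarOcorrenciasGene dna.toList gene.toList t then acc + 1 else acc) (0 : Int)
        = ((genes.countP (fun gene => pvGenePresente dna.toList gene.toList t) : Nat) : Int) := by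
      have := PySem.List.foldl_if_add_one
        (fun gene => pvEncontrarOcorrenciasGene dna.toList gene.toList t) genes (0 : Int)
      rw [this]
      have : genes.countP (fun gene => pvEncontrarOcorrenciasGene dna.toList gene.toList t)
           = genes.countP (fun gene => pvGenePresente dna.toList gene.toList t) := by
        apply List.countP_congr
        intro g _
        simp [pvGene_eq dna.toList g.toList t]
      omega
    rw [hm]
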